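-- pv_equiv track=rewrite | github.com/JosuaKugler/mpim_graphs | complete_bruteforce_3.py | get_filled_rows_list
-- ===== SOURCE A (Python) =====
-- def get_filled_rows(max_vals, this_sum):
--     """
--     max_vals is a list of the maximum values that can be taken in this row
--     sum is the total sum that can be achieved in this row
--     """
--     #find all ways to partition this_sum onto the respective row such that
--     #no entry at index i is bigger than max_vals[i]
--     solutions = []
--     if len(max_vals) == 1:
--         if this_sum <= max_vals[0]:
--             return [[this_sum]]
--         else:
--             return []
--     for i in range(min(max_vals[0], this_sum)+1):
--         solutions += [[i] + solution for solution in get_filled_rows(max_vals[1:], this_sum - i)]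
--     return solutions
--
-- def get_filled_rows_list(previous_rows_list, N):
--     previous = len(previous_rows_list)
--     #maxvals is maximally 2 because we don't allow three-edges
--     max_vals = [min(2, 3 - sum([previous_rows_list[i][j] for i in range(previous)])) for j in range(previous+1,N)]
--     symmetric_part = [previous_rows_list[i][previous] for i in range(previous)]
--     this_sum = 3 - sum(symmetric_part)
--     if previous == N-2:
--         actual_max_val = 3 - sum([previous_rows_list[i][N-1] for i in range(previous)])
--         if this_sum == actual_max_val:
--             second_to_last_row = symmetric_part + [0, this_sum]
--             last_row = [previous_rows_list[i][N-1] for i in range(previous)] + [this_sum, 0]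
--             return [previous_rows_list + [second_to_last_row, last_row]]
--         else:
--             return []
--     possible_next_rows = get_filled_rows(max_vals, this_sum)
--     solutions = []
--     for row in possible_next_rows:
--         new_row = symmetric_part + [0] + row
--         solutions.append(previous_rows_list + [new_row])
--     return solutions #jedes Element dieser Liste ist eine Liste von Zeilen
-- ===== SOURCE B (Python) =====
-- def get_filled_rows_list(previous_rows_list, N):
--     previous = len(previous_rows_list)
--     symmetric_part = [row[previous] for row in previous_rows_list]
--     this_sum = 3 - sum(symmetric_part)
--     if previous == N - 2:
--         last_col = [row[N - 1] for row in previous_rows_list]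
--         if this_sum == 3 - sum(last_col):
--             return [previous_rows_list + [symmetric_part + [0, this_sum],
--                                           last_col + [this_sum, 0]]]
--         return []
--     max_vals = [min(2, 3 - sum(row[j] for row in previous_rows_list))
--                 for j in range(previous + 1, N)]
--     # breadth-first: grow row prefixes column by column, keeping the remaining sum
--     partials = [([], this_sum)]
--     for m in max_vals[:-1]:
--         partials = [(prefix + [i], rem - i)
--                     for prefix, rem in partials
--                     for i in range(min(m, rem) + 1)]
--     last_max = max_vals[-1]
--     return [previous_rows_list + [symmetric_part + [0] + prefix + [rem]]
--             for prefix, rem in partials if rem <= last_max]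
-- ===== Notes on version B (the rewrite author's own statement) =====
-- stated objective: alternative
-- what changed: Replaces the depth-first partition recursion (get_filled_rows) by an iterative breadth-first pass that grows (prefix, remaining-sum) pairs column by column and finally filters on the last column's maximum; the special previous==N-2 case is kept.
import Mathlib
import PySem

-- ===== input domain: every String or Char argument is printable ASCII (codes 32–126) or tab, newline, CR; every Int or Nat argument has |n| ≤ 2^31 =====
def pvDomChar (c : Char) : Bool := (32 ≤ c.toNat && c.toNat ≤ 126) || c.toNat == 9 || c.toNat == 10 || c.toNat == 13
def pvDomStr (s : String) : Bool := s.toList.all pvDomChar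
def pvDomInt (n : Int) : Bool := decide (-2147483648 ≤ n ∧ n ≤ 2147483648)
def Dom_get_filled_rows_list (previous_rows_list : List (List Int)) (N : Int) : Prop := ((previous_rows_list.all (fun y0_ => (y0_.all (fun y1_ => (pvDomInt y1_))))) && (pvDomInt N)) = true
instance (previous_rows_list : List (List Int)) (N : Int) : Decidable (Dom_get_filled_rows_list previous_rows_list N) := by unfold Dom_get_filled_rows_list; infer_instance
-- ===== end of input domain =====

-- B replaces A's depth-first partition recursion by an iterative breadth-first pass over the
-- columns that maintains (prefix, remaining-sum) pairs (objective: alternative, same cost).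


-- ===== PORT A =====
-- sum([rows[i][j] for i in range(len(rows))])  (column j of rows; exact inside Pre_, where every index is in range)
def pvColSum (rows : List (List Int)) (j : Int) : Int :=
  rows.foldl (fun acc row => acc + ((PySem.List.pyGet? row j).getD 0)) 0

-- helper get_filled_rows: recursive partition with pruning, literally A's code
def pvGetFilledRows : List Int → Int → List (List Int)
  | [], _ => []                     -- Python raises IndexError here; unreachable from the entry inside Pre_
  | [m], s => if s ≤ m then [[s]] else []
  | m :: m' :: rest, s =>
      (PySem.List.pyRange 0 (min m s + 1) 1).foldl
        (fun sols i =>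
          sols ++ (pvGetFilledRows (m' :: rest) (s - i)).map (fun sol => i :: sol)) []

def get_filled_rows_list (previous_rows_list : List (List Int)) (N : Int) : List (List (List Int)) :=
  let previous : Int := previous_rows_list.length
  let max_vals : List Int :=
    (PySem.List.pyRange (previous + 1) N 1).map (fun j => min 2 (3 - pvColSum previous_rows_list j))
  let symmetric_part : List Int :=
    previous_rows_list.map (fun row => (PySem.List.pyGet? row previous).getD 0)
  let this_sum : Int := 3 - symmetric_part.foldl (· + ·) 0
  if previous = N - 2 then
    let actual_max_val : Int := 3 - pvColSum previous_rows_list (N - 1)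
    if this_sum = actual_max_val then
      let second_to_last_row := symmetric_part ++ [0, this_sum]
      let last_row :=
        (previous_rows_list.map (fun row => (PySem.List.pyGet? row (N - 1)).getD 0)) ++ [this_sum, 0]
      [previous_rows_list ++ [second_to_last_row, last_row]]
    else []
  else
    (pvGetFilledRows max_vals this_sum).foldl
      (fun sols row => sols ++ [previous_rows_list ++ [symmetric_part ++ [0] ++ row]]) []

-- ===== PORT B =====
-- one breadth-first extension step: every partial row gains one more column
def pvExtend (partials : List (List Int × Int)) (m : Int) : List (List Int × Int) :=
  partials.flatMap (fun pr =>
    (PySem.List.pyRange 0 (min m pr.2 + 1) 1).map (fun i => (pr.1 ++ [i], pr.2 - i)))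

def get_filled_rows_list_alt (previous_rows_list : List (List Int)) (N : Int) : List (List (List Int)) :=
  let previous : Int := previous_rows_list.length
  let symmetric_part : List Int :=
    previous_rows_list.map (fun row => (PySem.List.pyGet? row previous).getD 0)
  let this_sum : Int := 3 - symmetric_part.foldl (· + ·) 0
  if previous = N - 2 then
    let last_col : List Int :=
      previous_rows_list.map (fun row => (PySem.List.pyGet? row (N - 1)).getD 0)
    if this_sum = 3 - last_col.foldl (· + ·) 0 then
      [previous_rows_list ++ [symmetric_part ++ [0, this_sum], last_col ++ [this_sum, 0]]]
    else []
  else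
    let max_vals : List Int :=
      (PySem.List.pyRange (previous + 1) N 1).map (fun j => min 2 (3 - pvColSum previous_rows_list j))
    let partials := max_vals.dropLast.foldl pvExtend [([], this_sum)]
    match max_vals.getLast? with
    | none => []                    -- Python raises IndexError (max_vals[-1] on []); unreachable inside Pre_
    | some last_max =>
        (partials.filter (fun pr => pr.2 ≤ last_max)).map
          (fun pr => previous_rows_list ++ [symmetric_part ++ [0] ++ pr.1 ++ [pr.2]])

-- ===== PRECONDITION & SPEC =====
-- Pre_ excludes exactly the inputs where Python A raises IndexError: a previous row shorter than N
-- (columns up to N-1 are read) or len(previous_rows_list) > N-2 (get_filled_rows would hit max_vals[0] on []).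
def Pre_get_filled_rows_list (previous_rows_list : List (List Int)) (N : Int) : Prop :=
  (previous_rows_list.length : Int) ≤ N - 2 ∧
    ∀ row ∈ previous_rows_list, N ≤ (row.length : Int)
instance (previous_rows_list : List (List Int)) (N : Int) : Decidable (Pre_get_filled_rows_list previous_rows_list N) := by unfold Pre_get_filled_rows_list; infer_instance

def pvWitness_get_filled_rows_list : List (List Int) × Int := ([[0, 1, 0, 2], [1, 0, 1, 1]], 4)

def Spec_get_filled_rows_list (previous_rows_list : List (List Int)) (N : Int) (out : List (List (List Int))) : Prop := out = get_filled_rows_list_alt previous_rows_list N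
instance (previous_rows_list : List (List Int)) (N : Int) (out : List (List (List Int))) : Decidable (Spec_get_filled_rows_list previous_rows_list N out) := by unfold Spec_get_filled_rows_list; infer_instance

-- ===== CLAIM (what is proved, stated in full; the proofs are below) =====
def Claim_equal_get_filled_rows_list : Prop := ∀ (previous_rows_list : List (List Int)) (N : Int), Dom_get_filled_rows_list previous_rows_list N → Pre_get_filled_rows_list previous_rows_list N → Spec_get_filled_rows_list previous_rows_list N (get_filled_rows_list previous_rows_list N)

-- ===== LEMMAS AND PROOFS =====

-- map f (filter p l) written as a flatMap (shape of the final filtering pass of B)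
theorem pv_map_filter_eq_flatMap {α β : Type} (p : α → Bool) (f : α → β) (l : List α) :
    (l.filter p).map f = l.flatMap (fun x => if p x then [f x] else []) := by
  induction l with
  | nil => rfl
  | cons x xs ih =>
      by_cases h : p x <;> simp [List.flatMap_cons, h, ih]

-- the breadth-first invariant: folding the extension step over ms and then finishing with
-- last column `lastm` produces, for each seed partial, exactly A's recursion on ms ++ [lastm]
theorem pv_bf_invariant (ms : List Int) (lastm : Int) :
    ∀ (ps : List (List Int × Int)),
      ((ms.foldl pvExtend ps).filter (fun pr => pr.2 ≤ lastm)).map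
          (fun pr => pr.1 ++ [pr.2])
        = ps.flatMap (fun pr => (pvGetFilledRows (ms ++ [lastm]) pr.2).map (fun sol => pr.1 ++ sol)) := by
  induction ms with
  | nil =>
      intro ps
      simp only [List.foldl_nil, List.nil_append]
      rw [pv_map_filter_eq_flatMap]
      apply List.flatMap_congr
      intro pr _
      by_cases h : pr.2 ≤ lastm <;> simp [pvGetFilledRows, h]
  | cons m ms ih =>
      intro ps
      simp only [List.foldl_cons]
      rw [ih]
      simp only [pvExtend]
      rw [List.flatMap_assoc]
      apply List.flatMap_congr
      intro pr _
      cases hms : ms ++ [lastm] with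
      | nil => simp at hms
      | cons m' rest =>
          have : pvGetFilledRows (m :: m' :: rest) pr.2
              = (PySem.List.pyRange 0 (min m pr.2 + 1) 1).flatMap
                  (fun i => (pvGetFilledRows (m' :: rest) (pr.2 - i)).map (fun sol => i :: sol)) := by
            simp [pvGetFilledRows, List.flatMap_def]
          rw [← hms, List.cons_append, hms, this]
          simp only [List.flatMap_map, List.map_flatMap, List.map_map]
          apply List.flatMap_congr
          intro i _
          apply List.map_congr_left
          intro sol _
          simp

-- folding `acc ++ [f x]` is map (shape of A's final solutions loop)
theorem pv_foldl_append_map {α β : Type} (f : α → β) (l : List α) :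
    l.foldl (fun sols x => sols ++ [f x]) [] = l.map f := by
  simpa using PySem.List.foldl_append_singleton_eq_map (l := l) (f := f) []

-- the core agreement on a non-empty max_vals list
theorem pv_rows_eq (max_vals : List Int) (lastm : Int) (h : max_vals.getLast? = some lastm)
    (s : Int) :
    pvGetFilledRows max_vals s
      = ((max_vals.dropLast.foldl pvExtend [([], s)]).filter (fun pr => pr.2 ≤ lastm)).map
          (fun pr => pr.1 ++ [pr.2]) := by
  have hne : max_vals ≠ [] := by intro hh; simp [hh] at h
  have hdecomp : max_vals.dropLast ++ [lastm] = max_vals :=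
    List.dropLast_append_getLast? lastm h
  rw [pv_bf_invariant max_vals.dropLast lastm [([], s)], hdecomp]
  simp

theorem get_filled_rows_list_eq (previous_rows_list : List (List Int)) (N : Int)
    (hpre : Pre_get_filled_rows_list previous_rows_list N) :
    get_filled_rows_list previous_rows_list N = get_filled_rows_list_alt previous_rows_list N := by
  obtain ⟨hlen, _⟩ := hpre
  unfold get_filled_rows_list get_filled_rows_list_alt
  by_cases hcase : (previous_rows_list.length : Int) = N - 2
  · simp [hcase, pvColSum, List.foldl_map]
  · simp only [if_neg hcase]
    -- max_vals is non-empty: its length is (N - (previous+1)).toNat ≥ 1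
    set p : Int := (previous_rows_list.length : Int) with hp
    set max_vals : List Int :=
      (PySem.List.pyRange (p + 1) N 1).map (fun j => min 2 (3 - pvColSum previous_rows_list j))
      with hmv
    have hlt : p + 1 < N := by omega
    have hmvne : max_vals ≠ [] := by
      rw [hmv, ← List.length_pos_iff, List.length_map, PySem.List.length_pyRange_one]
      omega
    obtain ⟨lastm, hlast⟩ := Option.ne_none_iff_exists'.mp (mt List.getLast?_eq_none_iff.mp hmvne)
    rw [hlast]
    rw [pv_rows_eq max_vals lastm hlast, pv_foldl_append_map, List.map_map]
    simp

-- ===== VERDICT (by name: the statement is the Claim_ definition above) =====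
theorem get_filled_rows_list_spec : Claim_equal_get_filled_rows_list := by
  intro rows N _ hpre
  unfold Spec_get_filled_rows_list
  exact get_filled_rows_list_eq rows N hpre
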